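-- pv_equiv track=rewrite | github.com/heikowagner/thebigdatablog | jupyter_notebooks/transformer/data_preparation.py | construct_subsequences
-- ===== SOURCE A (Python) =====
-- def construct_subsequences(df, limit=None):
--     '''
--     We generate all possible observed sequences, the last letter is the letter to be predicted.
--     This approach may allow the model to use the context of each line to help the model in those cases where a simple one-word-in-and-out model creates ambiguity.
--     '''
--     if not limit:
--         limit = df.shape[0]
--     sequences = []
--     for row in df[:limit]:
--         i=-1
--         row_sequences = []
--         for letter in row.split():
--             if i>=0:
--                 if i>0:
--                     row_sequences.append(row_sequences_dummy + [letter] )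
--                 row_sequences_dummy = row_sequences_dummy + [letter]
--             else:
--                 row_sequences_dummy=[letter]
--             i=i+1
--         sequences.append(row_sequences)
--     return [num for elem in sequences for num in elem]
-- ===== SOURCE B (Python) =====
-- def construct_subsequences(df, limit=None):
--     if not limit:
--         limit = len(df)
--     out = []
--     for row in df[:limit]:
--         words = row.split()
--         for k in range(3, len(words) + 1):
--             out.append(words[:k])
--     return out
-- ===== Notes on version B (the rewrite author's own statement) =====
-- stated objective: simpler
-- what changed: Replaces A's per-row i/accumulator/dummy state machine plus per-row list and final double-comprehension flatten with one flat output list filled by slicing each row's word list to every prefix length k in range(3, len(words)+1).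
-- crash fix: When limit is None or 0 A evaluates df.shape[0] and raises AttributeError on a plain list; B uses len(df) there and returns all length>=3 word prefixes of every row. — e.g. on construct_subsequences(["a b c d"], none): A raises AttributeError, B returns [["a", "b", "c"], ["a", "b", "c", "d"]]
import Mathlib
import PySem

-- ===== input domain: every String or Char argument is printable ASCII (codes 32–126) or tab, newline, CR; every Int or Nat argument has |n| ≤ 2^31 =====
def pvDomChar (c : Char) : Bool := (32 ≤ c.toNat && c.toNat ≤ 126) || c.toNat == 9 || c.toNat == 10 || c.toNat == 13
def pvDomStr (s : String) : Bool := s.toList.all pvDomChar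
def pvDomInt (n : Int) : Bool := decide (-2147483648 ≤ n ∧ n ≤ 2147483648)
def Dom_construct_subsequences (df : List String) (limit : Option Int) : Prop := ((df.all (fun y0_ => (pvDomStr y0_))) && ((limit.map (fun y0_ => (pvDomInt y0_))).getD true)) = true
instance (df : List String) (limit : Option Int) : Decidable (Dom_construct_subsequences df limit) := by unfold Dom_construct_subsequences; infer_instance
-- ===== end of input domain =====

-- B builds the flat result directly by slicing each row's word list to every prefix length k ∈ range(3, len+1),
-- instead of A's per-row index/accumulator state machine plus final flatten (objective: simpler).
-- A raises AttributeError (df.shape on a list) exactly when limit is None or 0; those inputs are outside Pre_ (Raises_ block below).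

-- ===== PORT A =====
-- A's inner-loop body, state (i, row_sequences, row_sequences_dummy); dummy starts as [] (Python leaves it unbound; it is never read before first assignment)
def stepA (st : Int × List (List String) × List String) (letter : String) : Int × List (List String) × List String :=
  if st.1 ≥ 0 then
    (st.1 + 1, (if st.1 > 0 then st.2.1 ++ [st.2.2 ++ [letter]] else st.2.1), st.2.2 ++ [letter])
  else
    (st.1 + 1, st.2.1, [letter])

def construct_subsequences (df : List String) (limit : Option Int) : List (List String) :=
  -- 'if not limit: limit = df.shape[0]' — df.shape[0] rendered as len(df); on a plain list Python raises AttributeError here (excluded by Pre_)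
  let lim : Int := match limit with
    | none => (df.length : Int)
    | some l => if l = 0 then (df.length : Int) else l
  let sequences : List (List (List String)) :=
    (PySem.List.slice df none (some lim)).foldl
      (fun sequences row => sequences ++ [((PySem.Str.split₀ row).foldl stepA (-1, [], [])).2.1]) []
  sequences.flatMap id

-- ===== PORT B =====
def construct_subsequences_alt (df : List String) (limit : Option Int) : List (List String) :=
  let lim : Int := match limit with
    | none => (df.length : Int)
    | some l => if l = 0 then (df.length : Int) else l
  (PySem.List.slice df none (some lim)).foldl
    (fun out row =>
      let words := PySem.Str.split₀ row
      (PySem.List.pyRange 3 ((words.length : Int) + 1) 1).foldl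
        (fun out k => out ++ [PySem.List.slice words none (some k)]) out) []

-- ===== PRECONDITION & SPEC =====
-- Pre_ excludes exactly limit = None and limit = 0, on which Python A raises AttributeError (df.shape[0] on a list).
def Pre_construct_subsequences (df : List String) (limit : Option Int) : Prop := limit.getD 0 ≠ 0
instance (df : List String) (limit : Option Int) : Decidable (Pre_construct_subsequences df limit) := by unfold Pre_construct_subsequences; infer_instance
def pvWitness_construct_subsequences : List String × Option Int := (["a b c d", "x y"], some 5)

-- When limit is None or 0, A evaluates df.shape[0] and raises AttributeError on a plain list; B uses len(df) and returns all length>=3 word prefixes of every row (theorem construct_subsequences_raises at the bottom checks the witness).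
def Raises_construct_subsequences (df : List String) (limit : Option Int) : Prop := limit.getD 0 = 0
instance (df : List String) (limit : Option Int) : Decidable (Raises_construct_subsequences df limit) := by unfold Raises_construct_subsequences; infer_instance
def pvRaiseWitness_construct_subsequences : List String × Option Int := (["a b c d"], none)
def pvRaiseWitnessOut_construct_subsequences : List (List String) := [["a", "b", "c"], ["a", "b", "c", "d"]]

def Spec_construct_subsequences (df : List String) (limit : Option Int) (out : List (List String)) : Prop := out = construct_subsequences_alt df limit
instance (df : List String) (limit : Option Int) (out : List (List String)) : Decidable (Spec_construct_subsequences df limit out) := by unfold Spec_construct_subsequences; infer_instance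

-- ===== CLAIM (what is proved, stated in full; the proofs are below) =====
def Claim_equal_construct_subsequences : Prop := ∀ (df : List String) (limit : Option Int), Dom_construct_subsequences df limit → Pre_construct_subsequences df limit → Spec_construct_subsequences df limit (construct_subsequences df limit)
def Claim_raises_construct_subsequences : Prop := (∀ (df : List String) (limit : Option Int), Dom_construct_subsequences df limit → Raises_construct_subsequences df limit → ¬ Pre_construct_subsequences df limit) ∧ (Dom_construct_subsequences (pvRaiseWitness_construct_subsequences.1) (pvRaiseWitness_construct_subsequences.2) ∧ Raises_construct_subsequences (pvRaiseWitness_construct_subsequences.1) (pvRaiseWitness_construct_subsequences.2) ∧ construct_subsequences_alt (pvRaiseWitness_construct_subsequences.1) (pvRaiseWitness_construct_subsequences.2) = pvRaiseWitnessOut_construct_subsequences)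

-- ===== LEMMAS AND PROOFS =====

-- the length-(3+k) prefixes of ws, k < len ws - 2 : the shared normal form of both inner loops
def prefixes3 (ws : List String) : List (List String) :=
  (List.range (ws.length - 2)).map (fun k => ws.take (3 + k))

lemma prefixes3_append (ys : List String) (l : String) :
    prefixes3 (ys ++ [l]) = prefixes3 ys ++ (if 2 ≤ ys.length then [ys ++ [l]] else []) := by
  unfold prefixes3
  by_cases h : 2 ≤ ys.length
  · have hlen : (ys ++ [l]).length - 2 = (ys.length - 2) + 1 := by
      simp [List.length_append]; omega
    rw [hlen, List.range_succ, List.map_append, List.map_singleton]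
    simp only [h, if_true]
    congr 1
    · apply List.map_congr_left
      intro k hk
      have hk' : k < ys.length - 2 := List.mem_range.mp hk
      rw [List.take_append_of_le_length (by omega)]
    · congr 1
      have : 3 + (ys.length - 2) = (ys ++ [l]).length := by simp; omega
      rw [this, List.take_length]
  · have h1 : ys.length - 2 = 0 := by omega
    have h2 : (ys ++ [l]).length - 2 = 0 := by simp; omega
    simp [h1, h]
    omega

lemma stateA (ws : List String) (hne : ws ≠ []) :
    ws.foldl stepA (-1, [], []) = ((ws.length : Int) - 1, prefixes3 ws, ws) := by
  induction ws using List.reverseRecOn with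
  | nil => exact absurd rfl hne
  | append_singleton ys l ih =>
    rcases eq_or_ne ys [] with rfl | hys
    · simp [stepA, prefixes3]
    · rw [List.foldl_append, ih hys]
      have h1 : 1 ≤ ys.length := List.length_pos_iff.mpr hys
      simp only [List.foldl_cons, List.foldl_nil, stepA]
      rw [prefixes3_append]
      split_ifs with ha hb hc hd <;>
        first
          | (exfalso; omega)
          | (refine Prod.ext ?_ (Prod.ext ?_ rfl) <;>
              simp only [List.length_append, List.length_cons, List.length_nil, List.append_nil] <;>
              push_cast <;> omega)

lemma innerA_eq (ws : List String) :
    (ws.foldl stepA (-1, [], [])).2.1 = prefixes3 ws := by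
  rcases eq_or_ne ws [] with rfl | h
  · simp [prefixes3]
  · rw [stateA ws h]

lemma innerB_eq (ws : List String) (acc : List (List String)) :
    (PySem.List.pyRange 3 ((ws.length : Int) + 1) 1).foldl
      (fun out k => out ++ [PySem.List.slice ws none (some k)]) acc = acc ++ prefixes3 ws := by
  rw [PySem.List.foldl_append_singleton_eq_map]
  congr 1
  rw [PySem.List.pyRange_one, List.map_map]
  have hn : ((ws.length : Int) + 1 - 3).toNat = ws.length - 2 := by omega
  rw [hn]
  unfold prefixes3
  apply List.map_congr_left
  intro k hk
  show PySem.List.slice ws none (some (3 + (k : Int))) = ws.take (3 + k)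
  have : (3 : Int) + (k : Int) = ((3 + k : Nat) : Int) := by push_cast; ring
  rw [this, PySem.List.slice_to_natCast]

lemma rows_eq (rows : List String) :
    ((rows.foldl (fun sequences row => sequences ++ [((PySem.Str.split₀ row).foldl stepA (-1, [], [])).2.1]) []).flatMap id)
    = rows.foldl (fun out row =>
        (PySem.List.pyRange 3 (((PySem.Str.split₀ row).length : Int) + 1) 1).foldl
          (fun out k => out ++ [PySem.List.slice (PySem.Str.split₀ row) none (some k)]) out) [] := by
  rw [PySem.List.foldl_append_singleton_eq_map, List.nil_append]
  have hB : (fun (out : List (List String)) (row : String) =>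
        (PySem.List.pyRange 3 (((PySem.Str.split₀ row).length : Int) + 1) 1).foldl
          (fun out k => out ++ [PySem.List.slice (PySem.Str.split₀ row) none (some k)]) out)
      = fun out row => out ++ prefixes3 (PySem.Str.split₀ row) := by
    funext out row; exact innerB_eq _ _
  rw [hB, PySem.List.foldl_append_eq_flatMap, List.nil_append]
  rw [List.flatMap_map]
  apply List.flatMap_congr
  intro row _
  simp only [id]
  exact innerA_eq _

-- ===== VERDICT (by name: the statement is the Claim_ definition above) =====
theorem construct_subsequences_spec : Claim_equal_construct_subsequences := by
  intro df limit _hd _hp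
  show construct_subsequences df limit = construct_subsequences_alt df limit
  unfold construct_subsequences construct_subsequences_alt
  exact rows_eq _

theorem construct_subsequences_raises : Claim_raises_construct_subsequences := by
  unfold Claim_raises_construct_subsequences
  constructor
  · intro df limit _ h hp; exact hp h
  · exact ⟨by decide, by decide, by decide⟩

-- self-check: re-extracts from construct_subsequences_raises the value B returns at the raise witness
theorem construct_subsequences_raises_witness_ok :
    construct_subsequences_alt pvRaiseWitness_construct_subsequences.1 pvRaiseWitness_construct_subsequences.2
      = pvRaiseWitnessOut_construct_subsequences := by
  have h := construct_subsequences_raises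
  unfold Claim_raises_construct_subsequences at h
  exact h.2.2.2
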